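-- pv_equiv track=rewrite | github.com/nullvalues/anchor | tests/pairmode/test_e2e_roundtrip.py | _remove_first_h2_section
-- ===== SOURCE A (Python) =====
-- def _remove_first_h2_section(text: str) -> tuple[str, str]:
--     """Remove the first ## section from markdown text.
--
--     Returns (modified_text, removed_heading) where removed_heading is the
--     heading text that was stripped (e.g. '## Session modes').
--     """
--     lines = text.splitlines(keepends=True)
--     # Find first ## heading
--     first_h2_idx = None
--     for i, line in enumerate(lines):
--         if line.startswith("## "):
--             first_h2_idx = i
--             break
--
--     if first_h2_idx is None:
--         raise ValueError("No ## heading found in text")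
--
--     removed_heading = lines[first_h2_idx].rstrip("\n")
--
--     # Find the next ## heading (or end of file)
--     next_h2_idx = None
--     for i in range(first_h2_idx + 1, len(lines)):
--         if lines[i].startswith("## "):
--             next_h2_idx = i
--             break
--
--     # Remove the section (heading + body)
--     if next_h2_idx is not None:
--         new_lines = lines[:first_h2_idx] + lines[next_h2_idx:]
--     else:
--         new_lines = lines[:first_h2_idx]
--
--     return "".join(new_lines), removed_heading
-- ===== SOURCE B (Python) =====
-- def _remove_first_h2_section(text: str) -> tuple[str, str]:
--     """Remove the first ## section from markdown text (single-pass version)."""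
--     out = []
--     found = False
--     skipping = False
--     removed_heading = None
--     for line in text.splitlines(keepends=True):
--         if line.startswith("## "):
--             if not found:
--                 found = True
--                 skipping = True
--                 removed_heading = line.rstrip("\n")
--             elif skipping:
--                 skipping = False
--         if not skipping:
--             out.append(line)
--     if not found:
--         raise ValueError("No ## heading found in text")
--     return "".join(out), removed_heading
-- ===== Notes on version B (the rewrite author's own statement) =====
-- stated objective: alternative
-- what changed: Replaced the two index-search loops plus list slicing with a single state-machine pass (found/skipping flags) that builds the output list directly; Pre_ excludes texts with no '## ' line, where both A and B raise ValueError.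
import Mathlib
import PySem

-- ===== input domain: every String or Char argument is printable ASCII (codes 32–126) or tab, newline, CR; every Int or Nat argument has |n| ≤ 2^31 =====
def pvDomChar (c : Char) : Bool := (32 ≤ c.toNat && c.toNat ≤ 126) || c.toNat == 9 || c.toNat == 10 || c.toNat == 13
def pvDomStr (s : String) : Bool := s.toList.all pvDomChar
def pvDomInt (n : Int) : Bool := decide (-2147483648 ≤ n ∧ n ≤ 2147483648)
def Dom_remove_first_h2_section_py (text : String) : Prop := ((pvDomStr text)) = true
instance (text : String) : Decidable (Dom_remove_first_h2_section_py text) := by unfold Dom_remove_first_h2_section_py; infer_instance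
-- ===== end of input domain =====

-- B replaces A's two index-search loops + slicing by a single state-machine pass; same O(n) cost, different decomposition.
-- Pre_ excludes texts with no line starting "## ": there the Python A (and B) raises ValueError.


-- shared helpers: Python's text.splitlines(keepends=True) (exact on \n, \r, \r\n — the only
-- line breaks in the ASCII domain), line.rstrip("\n"), and line.startswith("## ")
def pvSplitK (cur : List Char) : List Char → List (List Char)
  | [] => if cur.isEmpty then [] else [cur.reverse]
  | '\n' :: rest => (cur.reverse ++ ['\n']) :: pvSplitK [] rest
  | '\r' :: '\n' :: rest => (cur.reverse ++ ['\r', '\n']) :: pvSplitK [] rest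
  | '\r' :: rest => (cur.reverse ++ ['\r']) :: pvSplitK [] rest
  | c :: rest => pvSplitK (c :: cur) rest

def pvRstripNl (l : List Char) : List Char := (l.reverse.dropWhile (fun c => c == '\n')).reverse

def pvIsH2 (l : List Char) : Bool := PySem.Chars.startswith l ['#', '#', ' ']

-- ===== PORT A =====
-- the first 'for i, line in enumerate(lines)' loop
def pvFindFirstH2 (i : Nat) : List (List Char) → Option Nat
  | [] => none
  | l :: ls => if pvIsH2 l then some i else pvFindFirstH2 (i + 1) ls

-- the second loop 'for i in range(first_h2_idx + 1, len(lines))'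
def pvFindNextH2 (lines : List (List Char)) (i : Nat) : Option Nat :=
  if h : i < lines.length then
    if pvIsH2 lines[i] then some i else pvFindNextH2 lines (i + 1)
  else none
termination_by lines.length - i

def remove_first_h2_section_py (text : String) : String × String :=
  let lines := pvSplitK [] text.toList
  match pvFindFirstH2 0 lines with
  | none => ("", "")  -- Python raises ValueError here; excluded by Pre_
  | some i =>
    let removed := pvRstripNl (lines.getD i [])
    let newLines :=
      match pvFindNextH2 lines (i + 1) with
      | some j => lines.take i ++ lines.drop j
      | none => lines.take i
    (String.ofList (PySem.Chars.join [] newLines), String.ofList removed)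

-- ===== PORT B =====
-- one loop iteration of Source B: state = (out, found, skipping, removed_heading)
def pvStepB (s : List (List Char) × Bool × Bool × List Char) (line : List Char) :
    List (List Char) × Bool × Bool × List Char :=
  let (out, found, skipping, removed) := s
  let (found', skipping', removed') :=
    if pvIsH2 line then
      if !found then (true, true, pvRstripNl line)
      else if skipping then (found, false, removed)
      else (found, skipping, removed)
    else (found, skipping, removed)
  (if skipping' then out else out ++ [line], found', skipping', removed')

def remove_first_h2_section_py_alt (text : String) : String × String :=
  let st := (pvSplitK [] text.toList).foldl pvStepB ([], false, false, [])
  (String.ofList (PySem.Chars.join [] st.1), String.ofList st.2.2.2)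
  -- 'if not found: raise ValueError' is outside Pre_

-- ===== PRECONDITION & SPEC =====
-- Pre_ excludes exactly the texts with no line starting "## ", on which Python A raises ValueError.
def Pre_remove_first_h2_section_py (text : String) : Prop :=
  ∃ l ∈ pvSplitK [] text.toList, pvIsH2 l = true
instance (text : String) : Decidable (Pre_remove_first_h2_section_py text) := by
  unfold Pre_remove_first_h2_section_py; infer_instance

def pvWitness_remove_first_h2_section_py : String := "## a\nbody\n## b\ntail\n"

def Spec_remove_first_h2_section_py (text : String) (out : String × String) : Prop :=
  out = remove_first_h2_section_py_alt text
instance (text : String) (out : String × String) :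
    Decidable (Spec_remove_first_h2_section_py text out) := by
  unfold Spec_remove_first_h2_section_py; infer_instance

-- ===== CLAIM (what is proved, stated in full; the proofs are below) =====
def Claim_equal_remove_first_h2_section_py : Prop :=
  ∀ (text : String), Dom_remove_first_h2_section_py text →
    Pre_remove_first_h2_section_py text →
    Spec_remove_first_h2_section_py text (remove_first_h2_section_py text)

-- ===== LEMMAS AND PROOFS =====
-- canonical form both ports are reduced to
def pvCanon (L : List (List Char)) : List (List Char) × List Char :=
  match L.dropWhile (fun l => !pvIsH2 l) with
  | [] => ([], [])
  | h :: rest => (L.takeWhile (fun l => !pvIsH2 l) ++ rest.dropWhile (fun l => !pvIsH2 l),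
                  pvRstripNl h)

def pvAcore (L : List (List Char)) : List (List Char) × List Char :=
  match pvFindFirstH2 0 L with
  | none => ([], [])
  | some i =>
    (match pvFindNextH2 L (i + 1) with
     | some j => L.take i ++ L.drop j
     | none => L.take i,
     pvRstripNl (L.getD i []))

theorem findFirst_shift (L : List (List Char)) :
    ∀ k, pvFindFirstH2 k L = (pvFindFirstH2 0 L).map (· + k) := by
  induction L with
  | nil => intro k; simp [pvFindFirstH2]
  | cons c ls ih =>
    intro k
    by_cases h : pvIsH2 c
    · simp [pvFindFirstH2, h]
    · simp [pvFindFirstH2, h, ih (k + 1), ih 1, Option.map_map]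
      cases pvFindFirstH2 0 ls <;> simp <;> omega

theorem findFirst_none (L : List (List Char)) :
    ∀ k, pvFindFirstH2 k L = none → ∀ x ∈ L, pvIsH2 x = false := by
  induction L with
  | nil => simp
  | cons c ls ih =>
    intro k h x hx
    by_cases hc : pvIsH2 c
    · simp [pvFindFirstH2, hc] at h
    · cases hx with
      | head => simpa using hc
      | tail _ hx => exact ih (k + 1) (by simpa [pvFindFirstH2, hc] using h) x hx

theorem findNext_shift (c : List Char) (ls : List (List Char)) :
    ∀ n k, ls.length - k ≤ n →
      pvFindNextH2 (c :: ls) (k + 1) = (pvFindNextH2 ls k).map (· + 1) := by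
  intro n
  induction n with
  | zero =>
    intro k hk
    have h1 : ¬ (k < ls.length) := by omega
    have h2 : ¬ (k + 1 < (c :: ls).length) := by simp; omega
    have hR : pvFindNextH2 ls k = none := by rw [pvFindNextH2]; simp [h1]
    have hL : pvFindNextH2 (c :: ls) (k + 1) = none := by rw [pvFindNextH2]; simp [h1]
    rw [hL, hR]; rfl
  | succ n ih =>
    intro k hk
    by_cases h : k < ls.length
    · have h2 : k + 1 < (c :: ls).length := by simp; omega
      have hL : pvFindNextH2 (c :: ls) (k + 1) =
          if pvIsH2 ls[k] then some (k + 1) else pvFindNextH2 (c :: ls) (k + 1 + 1) := by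
        rw [pvFindNextH2]; simp [h]
      have hR : pvFindNextH2 ls k =
          if pvIsH2 ls[k] then some k else pvFindNextH2 ls (k + 1) := by
        rw [pvFindNextH2]; simp [h]
      rw [hL, hR]
      by_cases hp : pvIsH2 ls[k]
      · simp [hp]
      · simp only [hp, if_neg (by simp [hp] : ¬ pvIsH2 ls[k] = true)]
        exact ih (k + 1) (by omega)
    · have h1 : ¬ (k < ls.length) := h
      have h2 : ¬ (k + 1 < (c :: ls).length) := by simp; omega
      have hR : pvFindNextH2 ls k = none := by rw [pvFindNextH2]; simp [h1]
      have hL : pvFindNextH2 (c :: ls) (k + 1) = none := by rw [pvFindNextH2]; simp [h1]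
      rw [hL, hR]; rfl

theorem findNext_dropWhile (ls : List (List Char)) :
    (match pvFindNextH2 ls 0 with
     | some j => ls.drop j
     | none => ([] : List (List Char))) = ls.dropWhile (fun l => !pvIsH2 l) := by
  induction ls with
  | nil => rw [pvFindNextH2]; simp
  | cons c ls ih =>
    rw [pvFindNextH2]
    by_cases h : pvIsH2 c
    · simp [h, List.dropWhile_cons]
    · simp only [List.length_cons, Nat.zero_lt_succ, dif_pos, List.getElem_cons_zero, h,
        if_neg (by simp [h] : ¬ pvIsH2 c = true)]
      rw [show (0 + 1 = 0 + 1) from rfl, findNext_shift c ls ls.length 0 (by omega)]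
      simp [List.dropWhile_cons, h]
      cases hf : pvFindNextH2 ls 0 with
      | none => simpa [hf] using ih
      | some j => simpa [hf] using ih

theorem A_canon (L : List (List Char)) : pvAcore L = pvCanon L := by
  induction L with
  | nil => rfl
  | cons c ls ih =>
    by_cases h : pvIsH2 c
    · have hf0 : pvFindFirstH2 0 (c :: ls) = some 0 := by simp [pvFindFirstH2, h]
      have hsh : pvFindNextH2 (c :: ls) (0 + 1) = (pvFindNextH2 ls 0).map (· + 1) :=
        findNext_shift c ls ls.length 0 (by omega)
      have hdw := findNext_dropWhile ls
      have hdwc : List.dropWhile (fun l => !pvIsH2 l) (c :: ls) = c :: ls := by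
        simp [List.dropWhile_cons, h]
      have htwc : List.takeWhile (fun l => !pvIsH2 l) (c :: ls) = [] := by
        simp [List.takeWhile_cons, h]
      unfold pvAcore pvCanon
      rw [hf0, hdwc]
      simp only [htwc, List.nil_append, List.take_zero, List.getD_cons_zero]
      rw [hsh]
      cases hf : pvFindNextH2 ls 0 with
      | none =>
        rw [hf] at hdw
        simp only at hdw
        simp [← hdw]
      | some j =>
        rw [hf] at hdw
        simp only at hdw
        simp only [Option.map_some, List.drop_succ_cons]
        rw [Prod.mk.injEq]
        exact ⟨by simpa using hdw, rfl⟩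
    · have hff : pvFindFirstH2 0 (c :: ls) = (pvFindFirstH2 0 ls).map (· + 1) := by
        simp [pvFindFirstH2, h, findFirst_shift ls 1]
      unfold pvAcore pvCanon
      rw [hff]
      cases hf : pvFindFirstH2 0 ls with
      | none =>
        have hall := findFirst_none ls 0 hf
        have hnil : ls.dropWhile (fun l => !pvIsH2 l) = [] :=
          List.dropWhile_eq_nil_iff.mpr (by intro x hx; simp [hall x hx])
        simp [List.dropWhile_cons, h, hnil]
      | some i =>
        simp only [Option.map_some]
        have hsh : pvFindNextH2 (c :: ls) (i + 1 + 1) = (pvFindNextH2 ls (i + 1)).map (· + 1) :=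
          findNext_shift c ls ls.length (i + 1) (by omega)
        rw [hsh]
        have hdwc : List.dropWhile (fun l => !pvIsH2 l) (c :: ls)
            = List.dropWhile (fun l => !pvIsH2 l) ls := by
          simp [List.dropWhile_cons, h]
        have htwc : List.takeWhile (fun l => !pvIsH2 l) (c :: ls)
            = c :: List.takeWhile (fun l => !pvIsH2 l) ls := by
          simp [List.takeWhile_cons, h]
        rw [hdwc, htwc]
        unfold pvAcore pvCanon at ih
        rw [hf] at ih
        cases hd : ls.dropWhile (fun l => !pvIsH2 l) with
        | nil =>
          exfalso
          have hall : ∀ x ∈ ls, pvIsH2 x = false := by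
            intro x hx
            have := List.dropWhile_eq_nil_iff.mp hd x hx
            simpa using this
          clear ih hd hsh hdwc htwc hff
          induction ls generalizing i with
          | nil => simp [pvFindFirstH2] at hf
          | cons d ds ihd =>
            have hdd : pvIsH2 d = false := hall d (by simp)
            simp only [pvFindFirstH2, hdd, Bool.false_eq_true, if_neg (by simp [hdd] :
              ¬ pvIsH2 d = true)] at hf
            rw [findFirst_shift ds 1] at hf
            cases hg : pvFindFirstH2 0 ds with
            | none => simp [hg] at hf
            | some i' => exact ihd i' hg (fun x hx => hall x (by simp [hx]))
        | cons hh rest =>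
          rw [hd] at ih
          simp only at ih ⊢
          rw [Prod.mk.injEq] at ih
          obtain ⟨ih1, ih2⟩ := ih
          rw [Prod.mk.injEq]
          constructor
          · cases hn : pvFindNextH2 ls (i + 1) with
            | none =>
              rw [hn] at ih1
              simp only [Option.map_none, List.take_succ_cons, List.cons_append]
              simp only at ih1
              rw [ih1]
            | some j =>
              rw [hn] at ih1
              simp only [Option.map_some, List.take_succ_cons, List.drop_succ_cons,
                List.cons_append]
              simp only at ih1
              rw [ih1]
          · simpa [List.getD] using ih2

-- B-side: one simp lemma per branch of the loop body, then the three phases of the fold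
theorem stepB_h2_new (out : List (List Char)) (skipping : Bool) (removed line : List Char)
    (h : pvIsH2 line = true) :
    pvStepB (out, false, skipping, removed) line = (out, true, true, pvRstripNl line) := by
  simp [pvStepB, h]

theorem stepB_h2_skip (out : List (List Char)) (removed line : List Char)
    (h : pvIsH2 line = true) :
    pvStepB (out, true, true, removed) line = (out ++ [line], true, false, removed) := by
  simp [pvStepB, h]

theorem stepB_h2_after (out : List (List Char)) (removed line : List Char)
    (h : pvIsH2 line = true) :
    pvStepB (out, true, false, removed) line = (out ++ [line], true, false, removed) := by
  simp [pvStepB, h]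

theorem stepB_no (out : List (List Char)) (found skipping : Bool) (removed line : List Char)
    (h : pvIsH2 line = false) :
    pvStepB (out, found, skipping, removed) line =
      (if skipping then out else out ++ [line], found, skipping, removed) := by
  simp [pvStepB, h]

theorem B3 (L : List (List Char)) :
    ∀ out r, L.foldl pvStepB (out, true, false, r) = (out ++ L, true, false, r) := by
  induction L with
  | nil => simp
  | cons x ls ih =>
    intro out r
    by_cases h : pvIsH2 x
    · rw [List.foldl_cons, stepB_h2_after out r x h, ih]; simp
    · rw [List.foldl_cons, stepB_no out true false r x (by simpa using h)]
      simp only [if_neg (by simp : ¬ (false = true))]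
      rw [ih]; simp

theorem B2 (L : List (List Char)) :
    ∀ out r,
      (L.foldl pvStepB (out, true, true, r)).1 = out ++ L.dropWhile (fun l => !pvIsH2 l) ∧
      (L.foldl pvStepB (out, true, true, r)).2.2.2 = r := by
  induction L with
  | nil => simp
  | cons x ls ih =>
    intro out r
    by_cases h : pvIsH2 x
    · rw [List.foldl_cons, stepB_h2_skip out r x h, B3 ls (out ++ [x]) r]
      simp [List.dropWhile_cons, h]
    · rw [List.foldl_cons, stepB_no out true true r x (by simpa using h)]
      simp only [if_pos rfl]
      have := ih out r
      simpa [List.dropWhile_cons, h] using this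

theorem B0 (L : List (List Char)) :
    ∀ out,
      (L.foldl pvStepB (out, false, false, [])).1 =
        out ++ (L.foldl pvStepB ([], false, false, [])).1 ∧
      (L.foldl pvStepB (out, false, false, [])).2.2.2 =
        (L.foldl pvStepB ([], false, false, [])).2.2.2 := by
  induction L with
  | nil => simp
  | cons x ls ih =>
    intro out
    by_cases h : pvIsH2 x
    · rw [List.foldl_cons, List.foldl_cons, stepB_h2_new out false [] x h,
        stepB_h2_new [] false [] x h]
      have h1 := B2 ls out (pvRstripNl x)
      have h2 := B2 ls [] (pvRstripNl x)
      exact ⟨by rw [h1.1, h2.1]; simp, by rw [h1.2, h2.2]⟩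
    · rw [List.foldl_cons, List.foldl_cons, stepB_no out false false [] x (by simpa using h),
        stepB_no [] false false [] x (by simpa using h)]
      simp only [if_neg (by simp : ¬ (false = true)), List.nil_append]
      have h1 := ih (out ++ [x])
      have h2 := ih [x]
      exact ⟨by rw [h1.1, h2.1]; simp, by rw [h1.2, h2.2]⟩

theorem B_canon (L : List (List Char)) (hex : ∃ l ∈ L, pvIsH2 l = true) :
    (L.foldl pvStepB ([], false, false, [])).1 = (pvCanon L).1 ∧
    (L.foldl pvStepB ([], false, false, [])).2.2.2 = (pvCanon L).2 := by
  induction L with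
  | nil => simp at hex
  | cons x ls ih =>
    by_cases h : pvIsH2 x
    · have hdwc : List.dropWhile (fun l => !pvIsH2 l) (x :: ls) = x :: ls := by
        simp [List.dropWhile_cons, h]
      have htwc : List.takeWhile (fun l => !pvIsH2 l) (x :: ls) = [] := by
        simp [List.takeWhile_cons, h]
      unfold pvCanon
      rw [hdwc]
      simp only [htwc, List.nil_append]
      rw [List.foldl_cons, stepB_h2_new [] false [] x h]
      exact ⟨(B2 ls [] (pvRstripNl x)).1, (B2 ls [] (pvRstripNl x)).2⟩
    · have hex' : ∃ l ∈ ls, pvIsH2 l = true := by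
        rcases hex with ⟨l, hl, hpl⟩
        cases hl with
        | head => exact absurd hpl (by simpa using h)
        | tail _ hl => exact ⟨l, hl, hpl⟩
      have ihh := ih hex'
      have hdwc : List.dropWhile (fun l => !pvIsH2 l) (x :: ls)
          = List.dropWhile (fun l => !pvIsH2 l) ls := by
        simp [List.dropWhile_cons, h]
      have htwc : List.takeWhile (fun l => !pvIsH2 l) (x :: ls)
          = x :: List.takeWhile (fun l => !pvIsH2 l) ls := by
        simp [List.takeWhile_cons, h]
      unfold pvCanon at ihh ⊢
      rw [hdwc]
      rw [List.foldl_cons, stepB_no [] false false [] x (by simpa using h)]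
      simp only [if_neg (by simp : ¬ (false = true)), List.nil_append]
      have hB := B0 ls [x]
      cases hd : ls.dropWhile (fun l => !pvIsH2 l) with
      | nil =>
        exfalso
        rcases hex' with ⟨l, hl, hpl⟩
        have := List.dropWhile_eq_nil_iff.mp hd l hl
        simp [hpl] at this
      | cons hh rest =>
        rw [hd] at ihh
        simp only at ihh ⊢
        rw [htwc]
        constructor
        · rw [hB.1, ihh.1]; simp
        · rw [hB.2, ihh.2]

-- ===== VERDICT (by name: the statement is the Claim_ definition above) =====
theorem remove_first_h2_section_py_spec : Claim_equal_remove_first_h2_section_py := by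
  intro text _ hpre
  unfold Spec_remove_first_h2_section_py
  unfold remove_first_h2_section_py remove_first_h2_section_py_alt
  set L := pvSplitK [] text.toList with hL
  have hex : ∃ l ∈ L, pvIsH2 l = true := hpre
  have hA : pvAcore L = pvCanon L := A_canon L
  have hB := B_canon L hex
  unfold pvAcore at hA
  cases hf : pvFindFirstH2 0 L with
  | none =>
    exfalso
    rcases hex with ⟨l, hl, hpl⟩
    have := findFirst_none L 0 hf l hl
    simp [hpl] at this
  | some i =>
    rw [hf] at hA
    simp only
    rw [hf]
    simp only
    have h1 : (match pvFindNextH2 L (i + 1) with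
        | some j => L.take i ++ L.drop j
        | none => L.take i) = (pvCanon L).1 := by
      have := congrArg Prod.fst hA; simpa using this
    have h2 : pvRstripNl (L.getD i []) = (pvCanon L).2 := by
      have := congrArg Prod.snd hA; simpa using this
    rw [h1, h2, ← hB.1, ← hB.2]
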